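-- pv_equiv track=rewrite | github.com/suryanashwin4u/DSA_PYTHON | Good or Bad string.py | isGoodorBad
-- ===== SOURCE A (Python) =====
-- def isGoodorBad(S):
--     vowels = set('aeiou')
--
--     v = 0   # consecutive vowels
--     c = 0   # consecutive consonants
--
--     for ch in S:
--         if ch in vowels:
--             v += 1
--             c = 0
--
--         elif ch == '?':
--             v += 1
--             c += 1
--
--         else:
--             c += 1
--             v = 0
--
--         if v > 5 or c > 3:
--             return 0
--
--     return 1
-- ===== SOURCE B (Python) =====
-- def isGoodorBad(S):
--     # Stateless sliding-window check: bad iff some window of 6 chars is all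
--     # vowel-or-'?' or some window of 4 chars is all non-vowel.
--     vowels = set('aeiou')
--     n = len(S)
--     i = 0
--     while i < n:
--         w6 = S[i:i+6]
--         if len(w6) == 6 and all(ch in vowels or ch == '?' for ch in w6):
--             return 0
--         w4 = S[i:i+4]
--         if len(w4) == 4 and all(ch not in vowels for ch in w4):
--             return 0
--         i += 1
--     return 1
-- ===== Notes on version B (the rewrite author's own statement) =====
-- stated objective: alternative
-- what changed: Replaced A's stateful scan maintaining consecutive-vowel and consecutive-consonant counters with a stateless sliding-window check: at each position B tests whether the next 6 characters are all vowel-or-question-mark or the next 4 are all non-vowels.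
import Mathlib
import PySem

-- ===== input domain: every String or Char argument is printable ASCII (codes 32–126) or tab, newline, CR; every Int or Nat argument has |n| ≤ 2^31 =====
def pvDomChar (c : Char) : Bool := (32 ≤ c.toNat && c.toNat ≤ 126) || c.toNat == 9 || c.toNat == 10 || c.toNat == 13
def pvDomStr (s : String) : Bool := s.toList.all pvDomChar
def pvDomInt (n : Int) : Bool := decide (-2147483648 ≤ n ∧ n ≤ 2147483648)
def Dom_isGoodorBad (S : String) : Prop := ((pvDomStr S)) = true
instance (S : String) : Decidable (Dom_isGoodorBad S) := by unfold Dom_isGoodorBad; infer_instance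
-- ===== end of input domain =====

-- B replaces A's stateful consecutive-vowel/consonant counters with a stateless
-- sliding-window check over suffixes (same cost; objective: alternative).


-- ===== PORT A =====
-- A's loop: per-character update of (v, c) with early return 0 when v > 5 or c > 3.
def goodLoopA : List Char → Int → Int → Int
  | [], _, _ => 1
  | ch :: rest, v, c =>
    let (v, c) :=
      if ['a','e','i','o','u'].contains ch then (v + 1, (0 : Int))
      else if ch = '?' then (v + 1, c + 1)
      else ((0 : Int), c + 1)
    if v > 5 || c > 3 then 0 else goodLoopA rest v c

def isGoodorBad (S : String) : Int := goodLoopA S.toList 0 0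

-- ===== PORT B =====
def vowQ (ch : Char) : Bool := ['a','e','i','o','u'].contains ch || ch = '?'
def conQ (ch : Char) : Bool := !(['a','e','i','o','u'].contains ch)

-- B's loop over suffixes (Python: index i over range(n), windows S[i:i+6], S[i:i+4]).
def goodLoopB : List Char → Int
  | [] => 1
  | ch :: rest =>
    let w6 := (ch :: rest).take 6
    if w6.length = 6 && w6.all vowQ then 0
    else
      let w4 := (ch :: rest).take 4
      if w4.length = 4 && w4.all conQ then 0
      else goodLoopB rest

def isGoodorBad_alt (S : String) : Int := goodLoopB S.toList

-- ===== PRECONDITION & SPEC =====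
def Spec_isGoodorBad (S : String) (out : Int) : Prop := out = isGoodorBad_alt S
instance (S : String) (out : Int) : Decidable (Spec_isGoodorBad S out) := by unfold Spec_isGoodorBad; infer_instance

-- ===== CLAIM (what is proved, stated in full; the proofs are below) =====
def Claim_equal_isGoodorBad : Prop := ∀ (S : String), Dom_isGoodorBad S → Spec_isGoodorBad S (isGoodorBad S)

-- ===== LEMMAS AND PROOFS =====

-- length of the longest prefix all of whose characters satisfy p
def lenWhile (p : Char → Bool) : List Char → Nat
  | [] => 0
  | ch :: r => if p ch then lenWhile p r + 1 else 0

-- "some suffix of l starts with a 6-run of vowQ or a 4-run of conQ"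
def badL : List Char → Bool
  | [] => false
  | ch :: r => decide (6 ≤ lenWhile vowQ (ch :: r)) || decide (4 ≤ lenWhile conQ (ch :: r)) || badL r

theorem take_all_iff (p : Char → Bool) (k : Nat) (l : List Char) :
    (((l.take k).length = k) ∧ (l.take k).all p = true) ↔ k ≤ lenWhile p l := by
  induction k generalizing l with
  | zero => simp
  | succ k ih =>
    cases l with
    | nil => simp [lenWhile]
    | cons ch r =>
      simp only [List.take_succ_cons, List.length_cons, List.all_cons, lenWhile,
        Bool.and_eq_true, Nat.add_left_inj]
      by_cases h : p ch
      · simp only [h, if_true, true_and]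
        rw [ih r]
        omega
      · simp [h]

theorem cond_eq (p : Char → Bool) (k : Nat) (l : List Char) :
    (decide ((l.take k).length = k) && (l.take k).all p) = decide (k ≤ lenWhile p l) := by
  rw [Bool.eq_iff_iff]
  simp only [Bool.and_eq_true, decide_eq_true_eq]
  exact take_all_iff p k l

theorem not_bad_bounds (r : List Char) (h : badL r = false) :
    lenWhile vowQ r ≤ 5 ∧ lenWhile conQ r ≤ 3 := by
  cases r with
  | nil => simp [lenWhile]
  | cons a b =>
    simp only [badL, Bool.or_eq_false_iff, decide_eq_false_iff_not] at h
    omega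

theorem if01_congr {C D : Bool} (h : C = true ↔ D = true) :
    (if C then (0 : Int) else 1) = (if D then 0 else 1) := by
  cases C <;> cases D <;> simp_all

theorem loopB_eq (l : List Char) : goodLoopB l = if badL l then 0 else 1 := by
  induction l with
  | nil => simp [goodLoopB, badL]
  | cons ch r ih =>
    simp only [goodLoopB, cond_eq, ih]
    by_cases h6 : 6 ≤ lenWhile vowQ (ch :: r)
    · simp [badL, h6]
    · by_cases h4 : 4 ≤ lenWhile conQ (ch :: r)
      · simp [badL, h6, h4]
      · simp [badL, h6, h4]

theorem loopA_eq (l : List Char) : ∀ (v c : Int), 0 ≤ v → v ≤ 5 → 0 ≤ c → c ≤ 3 →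
    goodLoopA l v c =
      if decide (6 ≤ v + (lenWhile vowQ l : Int)) || decide (4 ≤ c + (lenWhile conQ l : Int)) || badL l
      then 0 else 1 := by
  induction l with
  | nil => intro v c h1 h2 h3 h4; simp [goodLoopA, lenWhile, badL]; omega
  | cons ch r ih =>
    intro v c h1 h2 h3 h4
    by_cases hv : ['a','e','i','o','u'].contains ch = true
    · have hvq : vowQ ch = true := by simp only [vowQ, hv, Bool.true_or]
      have hcq : conQ ch = false := by simp only [conQ, hv, Bool.not_true]
      have e6 : lenWhile vowQ (ch :: r) = lenWhile vowQ r + 1 := by simp [lenWhile, hvq]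
      have e4 : lenWhile conQ (ch :: r) = 0 := by simp [lenWhile, hcq]
      simp only [goodLoopA, hv, if_true]
      by_cases hbig : 5 < v + 1
      · rw [if_pos (by simp; omega),
          if_pos (by simp only [e6, badL, Bool.or_eq_true, decide_eq_true_eq]; left; omega)]
      · rw [if_neg (by simp; omega), ih (v + 1) 0 (by omega) (by omega) le_rfl (by omega)]
        by_cases hb : badL r = true
        · rw [if_pos (by simp [hb]), if_pos (by simp [badL, hb])]
        · simp only [Bool.not_eq_true] at hb
          obtain ⟨hv5, hc3⟩ := not_bad_bounds r hb
          simp only [badL, hb, Bool.or_false, e6, e4]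
          apply if01_congr
          simp only [Bool.or_eq_true, decide_eq_true_eq]
          omega
    · by_cases hq : ch = '?'
      · subst hq
        have hv' : (['a','e','i','o','u'].contains '?') = false := by decide
        have e6 : lenWhile vowQ ('?' :: r) = lenWhile vowQ r + 1 := by simp [lenWhile, vowQ]
        have e4 : lenWhile conQ ('?' :: r) = lenWhile conQ r + 1 := by simp [lenWhile, conQ]
        simp only [goodLoopA, hv', Bool.false_eq_true, if_false, ite_true]
        by_cases hbig : 5 < v + 1 ∨ 3 < c + 1
        · rw [if_pos (by simp; omega),
            if_pos (by
              simp only [e6, e4, badL, Bool.or_eq_true, decide_eq_true_eq]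
              exact hbig.elim (fun h => Or.inl (Or.inl (by omega)))
                (fun h => Or.inl (Or.inr (by omega))))]
        · rw [if_neg (by simp; omega), ih (v + 1) (c + 1) (by omega) (by omega) (by omega) (by omega)]
          by_cases hb : badL r = true
          · rw [if_pos (by simp [hb]), if_pos (by simp [badL, hb])]
          · simp only [Bool.not_eq_true] at hb
            obtain ⟨hv5, hc3⟩ := not_bad_bounds r hb
            simp only [badL, hb, Bool.or_false, e6, e4]
            apply if01_congr
            simp only [Bool.or_eq_true, decide_eq_true_eq]
            omega
      · have hv' : (['a','e','i','o','u'].contains ch) = false := by simpa using hv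
        have hvq : vowQ ch = false := by unfold vowQ; rw [hv']; simp [hq]
        have hcq : conQ ch = true := by unfold conQ; rw [hv']; rfl
        have e6 : lenWhile vowQ (ch :: r) = 0 := by simp [lenWhile, hvq]
        have e4 : lenWhile conQ (ch :: r) = lenWhile conQ r + 1 := by simp [lenWhile, hcq]
        simp only [goodLoopA, hv', Bool.false_eq_true, if_false]
        rw [if_neg hq]
        by_cases hbig : 3 < c + 1
        · rw [if_pos (by simp; omega),
            if_pos (by
              simp only [e6, e4, badL, Bool.or_eq_true, decide_eq_true_eq]
              exact Or.inl (Or.inr (by omega)))]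
        · rw [if_neg (by simp; omega), ih 0 (c + 1) le_rfl (by omega) (by omega) (by omega)]
          by_cases hb : badL r = true
          · rw [if_pos (by simp [hb]), if_pos (by simp [badL, hb])]
          · simp only [Bool.not_eq_true] at hb
            obtain ⟨hv5, hc3⟩ := not_bad_bounds r hb
            simp only [badL, hb, Bool.or_false, e6, e4]
            apply if01_congr
            simp only [Bool.or_eq_true, decide_eq_true_eq]
            omega

-- ===== VERDICT (by name: the statement is the Claim_ definition above) =====
theorem isGoodorBad_spec : Claim_equal_isGoodorBad := by
  intro S _
  show isGoodorBad S = isGoodorBad_alt S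
  unfold isGoodorBad isGoodorBad_alt
  rw [loopA_eq S.toList 0 0 le_rfl (by norm_num) le_rfl (by norm_num), loopB_eq]
  by_cases hb : badL S.toList = true
  · simp [hb]
  · simp only [Bool.not_eq_true] at hb
    obtain ⟨h1, h2⟩ := not_bad_bounds _ hb
    simp only [hb]
    simp
    omega
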